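-- pv_equiv track=rewrite | github.com/rakeshgg/AdvanceDSA | 8. BackTracking/15. back_track.py | getRemovalCount
-- ===== SOURCE A (Python) =====
-- def getRemovalCount(s):
--     # import pdb
--     # pdb.set_trace()
--     st = []
--     for i in range(len(s)):
--         ch = s[i]
--         if ch == '(':
--             st.append(ch)
--         elif ch == ')':
--             # check non empty stack
--             if st and st[-1] == '(':
--                 st.pop()
--             else:
--                 st.append(ch)
--     return len(st)
-- ===== SOURCE B (Python) =====
-- def _dropPairs(t):
--     out = []
--     i = 0
--     n = len(t)
--     while i < n:
--         if i + 1 < n and t[i] == '(' and t[i + 1] == ')':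
--             i += 2
--         else:
--             out.append(t[i])
--             i += 1
--     return out
--
--
-- def getRemovalCount(s):
--     t = [ch for ch in s if ch in '()']
--     while True:
--         r = _dropPairs(t)
--         if len(r) == len(t):
--             return len(t)
--         t = r
-- ===== Notes on version B (the rewrite author's own statement) =====
-- stated objective: alternative
-- what changed: Replaces the one-pass stack simulation by a reduction algorithm: filter the string to its parentheses (one comprehension), then repeatedly delete every adjacent pair of open-close parentheses until a fixpoint is reached; the fixpoint's length is the answer.
import Mathlib
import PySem

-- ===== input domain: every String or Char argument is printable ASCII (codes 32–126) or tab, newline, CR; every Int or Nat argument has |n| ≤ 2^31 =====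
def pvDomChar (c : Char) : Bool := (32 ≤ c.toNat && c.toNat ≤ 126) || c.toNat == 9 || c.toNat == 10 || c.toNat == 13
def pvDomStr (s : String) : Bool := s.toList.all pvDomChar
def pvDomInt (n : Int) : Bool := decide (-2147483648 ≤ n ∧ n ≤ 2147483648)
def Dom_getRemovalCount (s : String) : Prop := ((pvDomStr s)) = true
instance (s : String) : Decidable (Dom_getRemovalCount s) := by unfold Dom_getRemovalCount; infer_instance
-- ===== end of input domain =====

-- B replaces A's stack scan with a different algorithm: filter to parentheses, then
-- repeatedly delete all adjacent '()' pairs until a fixpoint; the fixpoint's length is the answer.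

-- ===== PORT A =====
-- one loop step of A: push '(' ; on ')' pop a matching '(' from the top, else push
def pvAStep (st : List Char) (ch : Char) : List Char :=
  if ch = '(' then st ++ [ch]
  else if ch = ')' then
    -- `st and st[-1] == '('` ⟺ the last element exists and is '('
    if st.getLast? = some '(' then st.dropLast else st ++ [ch]
  else st

def getRemovalCount (s : String) : Int :=
  ((s.toList.foldl pvAStep []).length : Int)

-- ===== PORT B =====
-- one pass of B's inner while-loop: drop every (disjoint, left-to-right) adjacent "()" pair
def pvDropPairs : List Char → List Char
  | [] => []
  | [c] => [c]
  | c1 :: c2 :: rest =>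
    if c1 = '(' ∧ c2 = ')' then pvDropPairs rest
    else c1 :: pvDropPairs (c2 :: rest)

-- needed by pvReduce's termination argument
theorem pvDropPairs_length_le : ∀ t : List Char, (pvDropPairs t).length ≤ t.length := by
  intro t
  induction t using pvDropPairs.induct with
  | case1 => simp [pvDropPairs]
  | case2 c => simp [pvDropPairs]
  | case3 c1 c2 rest h ih => simp only [pvDropPairs, if_pos h]; simp; omega
  | case4 c1 c2 rest h ih => simp only [pvDropPairs, if_neg h]; simpa using ih

-- B's outer while-loop: reduce until the pass removes nothing
def pvReduce (t : List Char) : List Char :=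
  if _h : (pvDropPairs t).length = t.length then t else pvReduce (pvDropPairs t)
termination_by t.length
decreasing_by have := pvDropPairs_length_le t; omega

def getRemovalCount_alt (s : String) : Int :=
  ((pvReduce (s.toList.filter (fun c => c = '(' ∨ c = ')'))).length : Int)

-- ===== PRECONDITION & SPEC =====
def Spec_getRemovalCount (s : String) (out : Int) : Prop := out = getRemovalCount_alt s
instance (s : String) (out : Int) : Decidable (Spec_getRemovalCount s out) := by unfold Spec_getRemovalCount; infer_instance

-- ===== CLAIM (what is proved, stated in full; the proofs are below) =====
def Claim_equal_getRemovalCount : Prop := ∀ (s : String), Dom_getRemovalCount s → Spec_getRemovalCount s (getRemovalCount s)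

-- ===== LEMMAS AND PROOFS =====

-- A's fold ignores characters that are neither '(' nor ')'
theorem pv_foldA_filter : ∀ (l : List Char) (st : List Char),
    List.foldl pvAStep st (l.filter (fun c => c = '(' ∨ c = ')')) = List.foldl pvAStep st l := by
  intro l
  induction l with
  | nil => intro st; rfl
  | cons c cs ih =>
    intro st
    by_cases h : (c = '(' ∨ c = ')')
    · simp only [List.filter_cons, decide_eq_true_eq, if_pos h, List.foldl_cons]
      exact ih _
    · have hstep : pvAStep st c = st := by
        push Not at h
        simp [pvAStep, h.1, h.2]
      simp only [List.filter_cons, decide_eq_true_eq, if_neg h, List.foldl_cons, hstep]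
      exact ih st

-- processing '(' then ')' returns A's stack unchanged
theorem pv_cancel (st : List Char) : pvAStep (pvAStep st '(') ')' = st := by
  simp [pvAStep]

-- dropping adjacent "()" pairs does not change A's fold
theorem pv_foldA_dropPairs : ∀ (t : List Char) (st : List Char),
    List.foldl pvAStep st (pvDropPairs t) = List.foldl pvAStep st t := by
  intro t
  induction t using pvDropPairs.induct with
  | case1 => intro st; rfl
  | case2 c => intro st; rfl
  | case3 c1 c2 rest h ih =>
    intro st
    obtain ⟨h1, h2⟩ := h
    subst h1; subst h2
    simp only [pvDropPairs]
    simp only [List.foldl_cons, pv_cancel]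
    exact ih st
  | case4 c1 c2 rest h ih =>
    intro st
    simp only [pvDropPairs, if_neg h, List.foldl_cons]
    exact ih (pvAStep st c1)

-- hence the whole reduction loop does not change A's fold
theorem pv_foldA_reduce : ∀ (t : List Char) (st : List Char),
    List.foldl pvAStep st (pvReduce t) = List.foldl pvAStep st t := by
  intro t
  induction t using pvReduce.induct with
  | case1 t h => intro st; rw [pvReduce, dif_pos h]
  | case2 t h ih =>
    intro st
    rw [pvReduce, dif_neg h]
    rw [ih st, pv_foldA_dropPairs t st]

-- a pass that removes nothing returns its input
theorem pv_dropPairs_eq_of_length : ∀ t : List Char,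
    (pvDropPairs t).length = t.length → pvDropPairs t = t := by
  intro t
  induction t using pvDropPairs.induct with
  | case1 => intro _; rfl
  | case2 c => intro _; rfl
  | case3 c1 c2 rest h ih =>
    intro hlen
    exfalso
    have := pvDropPairs_length_le rest
    simp only [pvDropPairs, if_pos h] at hlen
    simp at hlen
    omega
  | case4 c1 c2 rest h ih =>
    intro hlen
    simp only [pvDropPairs, if_neg h] at hlen ⊢
    simp at hlen
    rw [ih hlen]

-- pvDropPairs output is a sublist of the input (used to preserve paren-only)
theorem pv_dropPairs_sublist : ∀ t : List Char, (pvDropPairs t).Sublist t := by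
  intro t
  induction t using pvDropPairs.induct with
  | case1 => simp [pvDropPairs]
  | case2 c => simp [pvDropPairs]
  | case3 c1 c2 rest h ih =>
    simp only [pvDropPairs, if_pos h]
    exact ih.trans ((List.sublist_cons_self c2 rest).trans (List.sublist_cons_self c1 _))
  | case4 c1 c2 rest h ih =>
    simp only [pvDropPairs, if_neg h]
    exact ih.cons₂ c1

-- a paren-only fixpoint of pvDropPairs is  ")…)(…("
theorem pv_shape : ∀ t : List Char,
    (∀ c ∈ t, c = '(' ∨ c = ')') → pvDropPairs t = t →
    ∃ r o, t = List.replicate r ')' ++ List.replicate o '(' := by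
  intro t
  induction t using pvDropPairs.induct with
  | case1 => intro _ _; exact ⟨0, 0, rfl⟩
  | case2 c =>
    intro hmem _
    rcases hmem c (by simp) with h | h
    · exact ⟨0, 1, by simp [h]⟩
    · exact ⟨1, 0, by simp [h]⟩
  | case3 c1 c2 rest h ih =>
    intro _ hfix
    exfalso
    have hle := pvDropPairs_length_le rest
    have := congrArg List.length hfix
    simp only [pvDropPairs, if_pos h] at this
    simp at this
    omega
  | case4 c1 c2 rest h ih =>
    intro hmem hfix
    simp only [pvDropPairs, if_neg h] at hfix
    have htail : pvDropPairs (c2 :: rest) = c2 :: rest := by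
      rw [List.cons.injEq] at hfix
      exact hfix.2
    obtain ⟨r, o, hro⟩ := ih (fun c hc => hmem c (List.mem_cons_of_mem c1 hc)) htail
    rcases hmem c1 (by simp) with h1 | h1
    · -- c1 = '(' : then c2 ≠ ')' so c2 = '(' and r = 0
      have hc2 : c2 = '(' := by
        rcases hmem c2 (by simp) with h2 | h2
        · exact h2
        · exact absurd ⟨h1, h2⟩ h
      have hr0 : r = 0 := by
        by_contra hr
        have : (c2 :: rest).head? = some ')' := by
          rw [hro]
          cases r with
          | zero => exact absurd rfl hr
          | succ k => simp [List.replicate_succ]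
        simp [hc2] at this
      subst hr0
      refine ⟨0, o + 1, ?_⟩
      rw [h1, hro]
      simp [List.replicate_succ]
    · -- c1 = ')'
      exact ⟨r + 1, o, by rw [h1, hro]; simp [List.replicate_succ]⟩

-- A's fold leaves ")…)" as is (from a ")…)" stack)
theorem pv_foldA_close : ∀ (r k : ℕ),
    List.foldl pvAStep (List.replicate k ')') (List.replicate r ')')
      = List.replicate (k + r) ')' := by
  intro r
  induction r with
  | zero => intro k; simp
  | succ n ih =>
    intro k
    have hstep : pvAStep (List.replicate k ')') ')' = List.replicate (k + 1) ')' := by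
      have hlast : (List.replicate k ')' : List Char).getLast? ≠ some '(' := by
        cases k with
        | zero => simp
        | succ m => simp [List.getLast?_replicate]
      simp [pvAStep, hlast, List.replicate_succ' (n := k)]
    rw [List.replicate_succ, List.foldl_cons, hstep, ih (k + 1)]
    congr 1
    omega

-- A's fold pushes "(…(" onto any stack
theorem pv_foldA_open : ∀ (o : ℕ) (st : List Char),
    List.foldl pvAStep st (List.replicate o '(') = st ++ List.replicate o '(' := by
  intro o
  induction o with
  | zero => intro st; simp
  | succ n ih =>
    intro st
    rw [List.replicate_succ, List.foldl_cons]
    have hstep : pvAStep st '(' = st ++ ['('] := by simp [pvAStep]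
    rw [hstep, ih, List.append_assoc]
    simp

-- A's fold on a canonical string returns it unchanged
theorem pv_foldA_canonical (r o : ℕ) :
    List.foldl pvAStep [] (List.replicate r ')' ++ List.replicate o '(')
      = List.replicate r ')' ++ List.replicate o '(' := by
  rw [List.foldl_append]
  rw [show (List.foldl pvAStep [] (List.replicate r ')')) = List.replicate r ')' from by
    simpa using pv_foldA_close r 0]
  exact pv_foldA_open o _

-- pvReduce preserves "paren-only" and ends in a fixpoint of pvDropPairs
theorem pv_reduce_props : ∀ t : List Char,
    (∀ c ∈ t, c = '(' ∨ c = ')') →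
    (∀ c ∈ pvReduce t, c = '(' ∨ c = ')') ∧ pvDropPairs (pvReduce t) = pvReduce t := by
  intro t
  induction t using pvReduce.induct with
  | case1 t h =>
    intro hmem
    rw [pvReduce, dif_pos h]
    exact ⟨hmem, pv_dropPairs_eq_of_length t h⟩
  | case2 t h ih =>
    intro hmem
    rw [pvReduce, dif_neg h]
    exact ih (fun c hc => hmem c ((pv_dropPairs_sublist t).mem hc))

-- ===== VERDICT (by name: the statement is the Claim_ definition above) =====
theorem getRemovalCount_spec : Claim_equal_getRemovalCount := by
  intro s _
  unfold Spec_getRemovalCount getRemovalCount getRemovalCount_alt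
  set l := s.toList with hl
  set f := l.filter (fun c => c = '(' ∨ c = ')') with hf
  have hparen : ∀ c ∈ f, c = '(' ∨ c = ')' := by
    intro c hc
    rw [hf] at hc
    simpa using (List.of_mem_filter hc)
  obtain ⟨hparen', hfix⟩ := pv_reduce_props f hparen
  obtain ⟨r, o, hro⟩ := pv_shape (pvReduce f) hparen' hfix
  have h1 : List.foldl pvAStep [] l = List.foldl pvAStep [] (pvReduce f) := by
    rw [pv_foldA_reduce f [], hf, pv_foldA_filter]
  rw [h1, hro, pv_foldA_canonical]
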